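-- pv_equiv track=rewrite | github.com/abdenlab/giql | benchmarks/data.py | _sort_records
-- ===== SOURCE A (Python) =====
-- def _chrom_sort_key(chrom: str) -> tuple[int, str]:
--     """Natural chromosome ordering: chr1→1, chrX→23."""
--     body = chrom[3:]  # strip "chr"
--     try:
--         return (int(body), "")
--     except ValueError:
--         return (23, body)
--
-- def _sort_records(
--     chroms: list[str],
--     starts: list[int],
--     ends: list[int],
-- ) -> tuple[list[str], list[int], list[int]]:
--     """Sort genomic records by natural chrom order then start."""
--     order = sorted(
--         range(len(chroms)),
--         key=lambda i: (_chrom_sort_key(chroms[i]), starts[i]),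
--     )
--     return (
--         [chroms[i] for i in order],
--         [starts[i] for i in order],
--         [ends[i] for i in order],
--     )
-- ===== SOURCE B (Python) =====
-- def _chrom_sort_key(chrom: str) -> tuple[int, str]:
--     """Natural chromosome ordering: chr1->1, chrX->23."""
--     body = chrom[3:]  # strip "chr"
--     try:
--         return (int(body), "")
--     except ValueError:
--         return (23, body)
--
-- def _sort_records(
--     chroms: list[str],
--     starts: list[int],
--     ends: list[int],
-- ) -> tuple[list[str], list[int], list[int]]:
--     """Sort genomic records by natural chrom order then start.
--
--     LSD-radix style: pack the columns into record tuples, then run TWO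
--     successive stable single-key sorts -- first by the minor key (start),
--     then by the major key (chrom) -- instead of one sort on a composite
--     key; stability of the second pass preserves the start order within
--     each chromosome.
--     """
--     recs = [(chroms[i], starts[i], ends[i]) for i in range(len(chroms))]
--     recs.sort(key=lambda r: r[1])
--     recs.sort(key=lambda r: _chrom_sort_key(r[0]))
--     return ([r[0] for r in recs], [r[1] for r in recs], [r[2] for r in recs])
-- ===== Notes on version B (the rewrite author's own statement) =====
-- stated objective: alternative
-- what changed: Replaces A's single argsort on the composite key (chrom-key, start) followed by three index-gather passes by an LSD-radix scheme over packed record tuples: two successive stable single-key sorts, first by the minor key start, then by the major chrom key, relying on sort stability instead of a composite comparison.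
import Mathlib
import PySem

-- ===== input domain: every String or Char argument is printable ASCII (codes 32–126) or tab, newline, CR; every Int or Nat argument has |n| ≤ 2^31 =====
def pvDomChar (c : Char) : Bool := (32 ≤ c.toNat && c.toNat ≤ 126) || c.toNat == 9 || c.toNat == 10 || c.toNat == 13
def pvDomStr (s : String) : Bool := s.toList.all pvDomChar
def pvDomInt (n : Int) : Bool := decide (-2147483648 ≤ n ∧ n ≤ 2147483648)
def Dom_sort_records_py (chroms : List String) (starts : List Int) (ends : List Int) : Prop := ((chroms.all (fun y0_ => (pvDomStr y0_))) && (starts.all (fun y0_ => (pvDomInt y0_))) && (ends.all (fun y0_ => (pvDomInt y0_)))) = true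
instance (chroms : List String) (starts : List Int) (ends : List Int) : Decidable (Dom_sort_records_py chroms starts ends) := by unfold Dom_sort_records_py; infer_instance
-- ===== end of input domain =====

-- B replaces A's single composite-key argsort + index gathers by an LSD-radix scheme over
-- zipped records: two successive stable single-key sorts (by start, then by chrom key),
-- relying on sort stability (objective: alternative; not claimed faster).

-- ===== PORT A =====
-- _chrom_sort_key: the Python key tuple (int, str) is encoded as the Int list n :: code points
-- of the body. List lexicographic order on these encodings is exactly Python's order on the
-- (int, str) key tuples (ints compare as ints, str comparison is code-point lexicographic,
-- a shorter prefix is smaller), and encodings are equal exactly when the tuples are.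
def chromKeyPy (chrom : String) : List Int :=
  let body := PySem.Chars.slice chrom.toList (some 3) none
  match PySem.Int.ofChars? body with
  | some n => [n]
  | none   => 23 :: body.map (fun c => (c.toNat : Int))

-- sorted(range(len(chroms)), key=lambda i: (_chrom_sort_key(chroms[i]), starts[i])):
-- PySem.List.sorted2 is the PySem primitive for sorted with a tuple key (k1, k2).
def sort_records_py (chroms : List String) (starts : List Int) (ends : List Int) : List String × List Int × List Int :=
  let order := PySem.List.sorted2 (PySem.List.pyRange 0 (chroms.length : Int) 1)
      (fun i => chromKeyPy (PySem.List.pyGetD chroms i ""))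
      (fun i => PySem.List.pyGetD starts i 0)
  (order.map (fun i => PySem.List.pyGetD chroms i ""),
   order.map (fun i => PySem.List.pyGetD starts i 0),
   order.map (fun i => PySem.List.pyGetD ends i 0))

-- ===== PORT B =====
-- recs = [(chroms[i], starts[i], ends[i]) for i in range(len(chroms))];
-- recs.sort(key=start); recs.sort(key=chrom key); then project the three columns back out.
def sort_records_py_alt (chroms : List String) (starts : List Int) (ends : List Int) : List String × List Int × List Int :=
  let recs : List (String × Int × Int) := (PySem.List.pyRange 0 (chroms.length : Int) 1).map
    (fun i => (PySem.List.pyGetD chroms i "", PySem.List.pyGetD starts i 0, PySem.List.pyGetD ends i 0))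
  let pass1 := PySem.List.sorted recs (fun r => r.2.1)
  let pass2 := PySem.List.sorted pass1 (fun r => chromKeyPy r.1)
  (pass2.map (fun r => r.1), pass2.map (fun r => r.2.1), pass2.map (fun r => r.2.2))

-- ===== PRECONDITION & SPEC =====
-- A raises IndexError when starts or ends is shorter than chroms (starts[i] in the sort key,
-- ends[i] in the gather comprehension); exactly those inputs are excluded.
def Pre_sort_records_py (chroms : List String) (starts : List Int) (ends : List Int) : Prop :=
  chroms.length ≤ starts.length ∧ chroms.length ≤ ends.length
instance (chroms : List String) (starts : List Int) (ends : List Int) : Decidable (Pre_sort_records_py chroms starts ends) := by unfold Pre_sort_records_py; infer_instance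

def pvWitness_sort_records_py : List String × List Int × List Int :=
  (["chr2", "chrX", "chr1", "chr1"], [5, 0, 7, 3], [9, 2, 8, 4])

def Spec_sort_records_py (chroms : List String) (starts : List Int) (ends : List Int) (out : List String × List Int × List Int) : Prop := out = sort_records_py_alt chroms starts ends
instance (chroms : List String) (starts : List Int) (ends : List Int) (out : List String × List Int × List Int) : Decidable (Spec_sort_records_py chroms starts ends out) := by unfold Spec_sort_records_py; infer_instance

-- ===== CLAIM (what is proved, stated in full; the proofs are below) =====
def Claim_equal_sort_records_py : Prop := ∀ (chroms : List String) (starts : List Int) (ends : List Int), Dom_sort_records_py chroms starts ends → Pre_sort_records_py chroms starts ends → Spec_sort_records_py chroms starts ends (sort_records_py chroms starts ends)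


-- ===== LEMMAS AND PROOFS =====

-- the strict total key both sorts are shown to realise: (chrom key, (start, index)), lex
def pvKfull (chroms : List String) (starts : List Int) (i : Int) : Lex (List Int × Lex (Int × Int)) :=
  toLex (chromKeyPy (PySem.List.pyGetD chroms i ""), toLex (PySem.List.pyGetD starts i 0, i))

def pvK2 (starts : List Int) (i : Int) : Lex (Int × Int) :=
  toLex (PySem.List.pyGetD starts i 0, i)

-- insertBy commutes with map when the comparison only looks through f
theorem pv_insertBy_map {α β : Type} (f : α → β) (bf : β → β → Bool) (x : α) (ys : List α) :
    PySem.List.insertBy bf (f x) (ys.map f)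
      = (PySem.List.insertBy (fun a b => bf (f a) (f b)) x ys).map f := by
  induction ys with
  | nil => simp [PySem.List.insertBy]
  | cons y ys ih =>
    simp only [List.map_cons, PySem.List.insertBy]
    split <;> simp_all

-- insertion sort of a mapped list = map of the insertion sort with the composed comparison
theorem pv_foldl_insertBy_map {α β : Type} (f : α → β) (bf : β → β → Bool) (xs : List α) :
    (xs.map f).foldl (fun acc y => PySem.List.insertBy bf y acc) []
      = (xs.foldl (fun acc x => PySem.List.insertBy (fun a b => bf (f a) (f b)) x acc) []).map f := by
  have aux : ∀ (xs : List α) (acc : List α),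
      (xs.map f).foldl (fun acc y => PySem.List.insertBy bf y acc) (acc.map f)
        = (xs.foldl (fun acc x => PySem.List.insertBy (fun a b => bf (f a) (f b)) x acc) acc).map f := by
    intro xs
    induction xs with
    | nil => intro acc; simp
    | cons x xs ih =>
      intro acc
      simp only [List.map_cons, List.foldl_cons]
      rw [pv_insertBy_map f bf x acc, ih]
  simpa using aux xs []

-- insertBy with two comparisons that agree on the accumulator's elements
theorem pv_insertBy_congr {α : Type} (b₁ b₂ : α → α → Bool) (x : α) (acc : List α)
    (h : ∀ y ∈ acc, b₁ x y = b₂ x y) :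
    PySem.List.insertBy b₁ x acc = PySem.List.insertBy b₂ x acc := by
  induction acc with
  | nil => rfl
  | cons y ys ih =>
    simp only [PySem.List.insertBy]
    rw [h y (by simp)]
    split
    · rfl
    · rw [ih (fun z hz => h z (by simp [hz]))]

-- on an R-pairwise list, two insertion sorts whose comparisons agree whenever the inserted
-- element came later in the list (R earlier later) produce the same result
theorem pv_foldl_insertBy_congr {α : Type} (R : α → α → Prop) (b₁ b₂ : α → α → Bool)
    (h : ∀ a c : α, R c a → b₁ a c = b₂ a c)
    (xs : List α) (hxs : xs.Pairwise R) :
    xs.foldl (fun acc x => PySem.List.insertBy b₁ x acc) []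
      = xs.foldl (fun acc x => PySem.List.insertBy b₂ x acc) [] := by
  have aux : ∀ (xs : List α) (acc : List α), xs.Pairwise R →
      (∀ y ∈ acc, ∀ x ∈ xs, R y x) →
      xs.foldl (fun acc x => PySem.List.insertBy b₁ x acc) acc
        = xs.foldl (fun acc x => PySem.List.insertBy b₂ x acc) acc := by
    intro xs
    induction xs with
    | nil => intro acc _ _; rfl
    | cons x xs ih =>
      intro acc hp hacc
      simp only [List.foldl_cons]
      have hins : PySem.List.insertBy b₁ x acc = PySem.List.insertBy b₂ x acc := by
        apply pv_insertBy_congr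
        intro y hy
        exact h x y (hacc y hy x (by simp))
      rw [hins]
      refine ih _ (List.Pairwise.of_cons hp) ?_
      intro y hy z hz
      rcases (PySem.List.mem_insertBy _ _ _ _).1 hy with rfl | hy'
      · exact (List.pairwise_cons.1 hp).1 z hz
      · exact hacc y hy' z (by simp [hz])
  exact aux xs [] hxs (by simp)

-- the index list both programs effectively run over is strictly increasing and duplicate-free
theorem pv_pyRange_pairwise (n : Nat) :
    (PySem.List.pyRange 0 (n : Int) 1).Pairwise (· < ·) := by
  rw [PySem.List.pyRange_zero_natCast]
  exact (List.pairwise_map.2 (List.pairwise_lt_range.imp (by exact_mod_cast fun h => h)))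

theorem pv_pyRange_nodup (n : Nat) : (PySem.List.pyRange 0 (n : Int) 1).Nodup :=
  (pv_pyRange_pairwise n).imp (fun h => by omega)

-- pvKfull and pvK2 are injective (the index is a component)
theorem pv_K2_inj (starts : List Int) : Function.Injective (pvK2 starts) := by
  intro a b h
  simpa using congrArg (fun x : Lex (Int × Int) => (ofLex x).2) h

theorem pv_Kfull_inj (chroms : List String) (starts : List Int) :
    Function.Injective (pvKfull chroms starts) := by
  intro a b h
  simpa using congrArg (fun x : Lex (List Int × Lex (Int × Int)) => (ofLex (ofLex x).2).2) h

-- a stable sort by an injective key of a duplicate-free list is strictly increasing in the key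
theorem pv_sorted_strict {α κ : Type} [LinearOrder κ] (xs : List α) (key : α → κ)
    (hinj : Function.Injective key) (hnd : xs.Nodup) :
    (PySem.List.sorted xs key).Pairwise (fun a b => key a < key b) := by
  have hp := PySem.List.sorted_pairwise xs key
  have hnd' : (PySem.List.sorted xs key).Nodup :=
    ((PySem.List.sorted_perm xs key false).nodup_iff).mpr hnd
  exact (hp.and hnd').imp (fun ⟨hle, hne⟩ => lt_of_le_of_ne hle (fun he => hne (hinj he)))

-- a sort of a mapped list is the map of the sort with the composed key
theorem pv_sorted_map {α β κ : Type} [LT κ] [DecidableLT κ] (f : α → β) (key : β → κ)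
    (xs : List α) :
    PySem.List.sorted (xs.map f) key = (PySem.List.sorted xs (fun a => key (f a))).map f := by
  rw [PySem.List.sorted_eq_foldl_insertBy, PySem.List.sorted_eq_foldl_insertBy]
  exact pv_foldl_insertBy_map f (fun a b => decide (key a < key b)) xs

-- two sorts whose strict key comparisons agree whenever the inserted element came later
-- (in the sense of an R-pairwise input list) coincide
theorem pv_sorted_key_congr {α κ₁ κ₂ : Type} [LT κ₁] [DecidableLT κ₁] [LT κ₂] [DecidableLT κ₂]
    (R : α → α → Prop) (k1 : α → κ₁) (k2 : α → κ₂)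
    (h : ∀ a c : α, R c a → decide (k1 a < k1 c) = decide (k2 a < k2 c))
    (xs : List α) (hxs : xs.Pairwise R) :
    PySem.List.sorted xs k1 = PySem.List.sorted xs k2 := by
  rw [PySem.List.sorted_eq_foldl_insertBy, PySem.List.sorted_eq_foldl_insertBy]
  exact pv_foldl_insertBy_congr R _ _ h xs hxs

-- A's composite comparison (chrom key, then start, stability tie-break by index) is the
-- strict pvKfull comparison, whenever the inserted element's index is larger
theorem pv_cmpA_agree (chroms : List String) (starts : List Int) (a c : Int) (hca : c < a) :
    ((decide (chromKeyPy (PySem.List.pyGetD chroms a "") < chromKeyPy (PySem.List.pyGetD chroms c "")))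
      || (!decide (chromKeyPy (PySem.List.pyGetD chroms c "") < chromKeyPy (PySem.List.pyGetD chroms a ""))
          && decide (PySem.List.pyGetD starts a 0 < PySem.List.pyGetD starts c 0)))
      = decide (pvKfull chroms starts a < pvKfull chroms starts c) := by
  unfold pvKfull
  rcases lt_trichotomy (chromKeyPy (PySem.List.pyGetD chroms a ""))
      (chromKeyPy (PySem.List.pyGetD chroms c "")) with hK | hK | hK
  · simp [Prod.Lex.lt_iff, hK, not_lt_of_gt hK]
  · have hac : ¬ (a < c) := by omega
    simp [Prod.Lex.lt_iff, hK, hac]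
  · simp [Prod.Lex.lt_iff, hK, not_lt_of_gt hK, ne_of_gt hK]

-- B's first pass (key = start, stability tie-break by index) is the strict pvK2 comparison
theorem pv_cmpS_agree (starts : List Int) (a c : Int) (hca : c < a) :
    decide (PySem.List.pyGetD starts a 0 < PySem.List.pyGetD starts c 0)
      = decide (pvK2 starts a < pvK2 starts c) := by
  unfold pvK2
  have hac : ¬ (a < c) := by omega
  simp [Prod.Lex.lt_iff, hac]

-- B's second pass (key = chrom key, stability tie-break by the first pass's pvK2 order) is
-- the strict pvKfull comparison
theorem pv_cmpC_agree (chroms : List String) (starts : List Int) (a c : Int)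
    (hca : pvK2 starts c < pvK2 starts a) :
    decide (chromKeyPy (PySem.List.pyGetD chroms a "") < chromKeyPy (PySem.List.pyGetD chroms c ""))
      = decide (pvKfull chroms starts a < pvKfull chroms starts c) := by
  unfold pvKfull
  unfold pvK2 at hca
  simp only [Prod.Lex.lt_iff, ofLex_toLex] at hca ⊢
  simp only [decide_eq_decide]
  constructor
  · exact fun h => Or.inl h
  · rintro (h | ⟨_, h⟩)
    · exact h
    · exfalso; omega

-- ===== VERDICT (by name: the statement is the Claim_ definition above) =====
theorem sort_records_py_spec : Claim_equal_sort_records_py := by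
  intro chroms starts ends _ _
  unfold Spec_sort_records_py sort_records_py sort_records_py_alt
  dsimp only
  set n := chroms.length with hn
  set rng := PySem.List.pyRange 0 (n : Int) 1 with hrng
  set recOf : Int → String × Int × Int := fun i =>
    (PySem.List.pyGetD chroms i "", PySem.List.pyGetD starts i 0, PySem.List.pyGetD ends i 0)
    with hrec
  -- A's order is the pvKfull sort of rng
  have hA : PySem.List.sorted2 rng (fun i => chromKeyPy (PySem.List.pyGetD chroms i ""))
        (fun i => PySem.List.pyGetD starts i 0)
      = PySem.List.sorted rng (pvKfull chroms starts) := by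
    show rng.foldl (fun acc x => PySem.List.insertBy _ x acc) [] = _
    rw [PySem.List.sorted_eq_foldl_insertBy]
    exact pv_foldl_insertBy_congr (· < ·) _ _
      (fun a c hca => pv_cmpA_agree chroms starts a c hca) rng (pv_pyRange_pairwise n)
  -- B's first pass is the pvK2 sort of rng, mapped through recOf
  have hB1 : PySem.List.sorted (rng.map recOf) (fun r => r.2.1)
      = (PySem.List.sorted rng (pvK2 starts)).map recOf :=
    Eq.trans (pv_sorted_map recOf (fun r => r.2.1) rng)
      (congrArg (List.map recOf)
        (pv_sorted_key_congr (· < ·) _ (pvK2 starts)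
          (fun a c hca => pv_cmpS_agree starts a c hca) rng (pv_pyRange_pairwise n)))
  -- B's second pass is the pvKfull sort of the same rng, mapped through recOf
  have hB2 : PySem.List.sorted ((PySem.List.sorted rng (pvK2 starts)).map recOf)
        (fun r => chromKeyPy r.1)
      = (PySem.List.sorted rng (pvKfull chroms starts)).map recOf :=
    Eq.trans (pv_sorted_map recOf (fun r => chromKeyPy r.1) (PySem.List.sorted rng (pvK2 starts)))
      (congrArg (List.map recOf)
        (Eq.trans
          (pv_sorted_key_congr (fun c a => pvK2 starts c < pvK2 starts a) _ (pvKfull chroms starts)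
            (fun a c hca => pv_cmpC_agree chroms starts a c hca)
            (PySem.List.sorted rng (pvK2 starts))
            (pv_sorted_strict rng (pvK2 starts) (pv_K2_inj starts) (pv_pyRange_nodup n)))
          (PySem.List.sorted_eq_sorted_of_perm _ rng (pvKfull chroms starts)
            (pv_Kfull_inj chroms starts) (PySem.List.sorted_perm rng (pvK2 starts) false))))
  rw [hA, hB1, hB2, List.map_map, List.map_map, List.map_map]
  rfl
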